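-- pv_equiv track=rewrite | github.com/Ben-Edwards44/Advent-Of-Code | 2023/day14.py | get_round_pos
-- ===== SOURCE A (Python) =====
-- def get_round_pos(col):
--     prev_cube = 0
--     num_round = 0
--
--     round_pos = []
--     for i, x in enumerate(col):
--         if x == "#":
--             prev_cube = i + 1
--             num_round = 0
--         elif x == "O":
--             pos = prev_cube + num_round
--             round_pos.append(pos)
--             num_round += 1
--
--     return round_pos
-- ===== SOURCE B (Python) =====
-- def get_round_pos(col):
--     return _settle(col, 0)
--
--
-- def _settle(col, base):
--     # Segment decomposition: count the 'O's before the first cube and emit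
--     # them as one contiguous range starting at the segment's start, then
--     # recurse on the rest of the column after the cube.
--     try:
--         k = col.index("#")
--     except ValueError:
--         return list(range(base, base + col.count("O")))
--     return list(range(base, base + col[:k].count("O"))) + _settle(col[k + 1:], base + k + 1)
-- ===== Notes on version B (the rewrite author's own statement) =====
-- stated objective: alternative
-- what changed: Replaces A's per-character running counters (prev_cube/num_round) with a segment decomposition: recursively find the next '#' with list.index, count the 'O's in the segment with .count, and emit them as one contiguous range per segment.
import Mathlib
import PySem

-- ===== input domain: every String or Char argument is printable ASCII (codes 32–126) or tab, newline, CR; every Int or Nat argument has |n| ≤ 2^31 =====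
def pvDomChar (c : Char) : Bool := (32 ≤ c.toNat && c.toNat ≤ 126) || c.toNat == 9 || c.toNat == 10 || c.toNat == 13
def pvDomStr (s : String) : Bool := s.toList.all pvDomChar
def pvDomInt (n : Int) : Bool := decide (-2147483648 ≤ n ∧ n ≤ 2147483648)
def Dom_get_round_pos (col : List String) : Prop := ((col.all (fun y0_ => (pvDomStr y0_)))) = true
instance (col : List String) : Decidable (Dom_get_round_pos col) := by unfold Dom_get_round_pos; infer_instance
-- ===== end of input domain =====

-- B replaces A's per-character running counters with a per-'#'-segment decomposition:
-- count the 'O's in each segment and emit them as one contiguous range (objective: alternative).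

-- ===== PORT A =====
def get_round_pos (col : List String) : List Int :=
  let s := (PySem.List.enumerate col).foldl
    (fun (st : Int × Int × List Int) (p : Int × String) =>
      let prev_cube := st.1
      let num_round := st.2.1
      let round_pos := st.2.2
      let i := p.1
      let x := p.2
      if x = "#" then (i + 1, 0, round_pos)
      else if x = "O" then (prev_cube, num_round + 1, round_pos ++ [prev_cube + num_round])
      else st)
    (0, 0, [])
  s.2.2

-- ===== PORT B =====
def pvSettle (col : List String) (base : Int) : List Int :=
  match h : PySem.List.index? col "#" with
  | none => PySem.List.pyRange base (base + (PySem.List.count col "O" : Int)) 1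
  | some k =>
      PySem.List.pyRange base (base + (PySem.List.count (PySem.List.slice col none (some (k : Int))) "O" : Int)) 1
        ++ pvSettle (PySem.List.slice col (some ((k : Int) + 1)) none) (base + (k : Int) + 1)
termination_by col.length
decreasing_by
  have hmem : "#" ∈ col := (PySem.List.index?_isSome_iff col "#").mp (by rw [h]; rfl)
  have hlen : 0 < col.length := List.length_pos_of_mem hmem
  rw [show ((k : Int) + 1) = ((k + 1 : Nat) : Int) by push_cast; ring, PySem.List.slice_from_natCast,
    List.length_drop]
  omega

def get_round_pos_alt (col : List String) : List Int := pvSettle col 0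

-- ===== PRECONDITION & SPEC =====
def Spec_get_round_pos (col : List String) (out : List Int) : Prop := out = get_round_pos_alt col
instance (col : List String) (out : List Int) : Decidable (Spec_get_round_pos col out) := by unfold Spec_get_round_pos; infer_instance

-- ===== CLAIM (what is proved, stated in full; the proofs are below) =====
def Claim_equal_get_round_pos : Prop := ∀ (col : List String), Dom_get_round_pos col → Spec_get_round_pos col (get_round_pos col)

-- ===== LEMMAS AND PROOFS =====

-- Proof-side cons version of A's loop: i = current absolute index, b = prev_cube + num_round.
def pvE (xs : List String) (i b : Int) : List Int :=
  match xs with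
  | [] => []
  | x :: rest =>
      if x = "#" then pvE rest (i + 1) (i + 1)
      else if x = "O" then b :: pvE rest (i + 1) (b + 1)
      else pvE rest (i + 1) b

theorem pvA_loop (xs : List String) (s pc nr : Int) (acc : List Int) :
    ((PySem.List.enumerate xs s).foldl
      (fun (st : Int × Int × List Int) (p : Int × String) =>
        let prev_cube := st.1
        let num_round := st.2.1
        let round_pos := st.2.2
        let i := p.1
        let x := p.2
        if x = "#" then (i + 1, 0, round_pos)
        else if x = "O" then (prev_cube, num_round + 1, round_pos ++ [prev_cube + num_round])
        else st)
      (pc, nr, acc)).2.2 = acc ++ pvE xs s (pc + nr) := by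
  induction xs generalizing s pc nr acc with
  | nil => simp [pvE, PySem.List.enumerate_nil]
  | cons x rest ih =>
      rw [PySem.List.enumerate_cons, List.foldl_cons]
      dsimp only
      by_cases h1 : x = "#"
      · rw [if_pos h1, ih,
          show pvE (x :: rest) s (pc + nr) = pvE rest (s + 1) (s + 1) by rw [pvE]; simp [h1]]
        norm_num
      · rw [if_neg h1]
        by_cases h2 : x = "O"
        · rw [if_pos h2, ih,
            show pvE (x :: rest) s (pc + nr) = (pc + nr) :: pvE rest (s + 1) (pc + nr + 1) by
              rw [pvE]; simp [h1, h2]]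
          simp [List.append_assoc]
          ring_nf
        · rw [if_neg h2, ih,
            show pvE (x :: rest) s (pc + nr) = pvE rest (s + 1) (pc + nr) by
              rw [pvE]; simp [h1, h2]]

-- pvE characterised segment-wise (by the first '#').
theorem pvE_seg (xs : List String) (i b : Int) :
    pvE xs i b =
      match PySem.List.index? xs "#" with
      | none => PySem.List.pyRange b (b + (PySem.List.count xs "O" : Int)) 1
      | some k =>
          PySem.List.pyRange b (b + ((PySem.List.count (xs.take k) "O") : Int)) 1
            ++ pvE (xs.drop (k + 1)) (i + (k : Int) + 1) (i + (k : Int) + 1) := by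
  induction xs generalizing i b with
  | nil => simp [pvE, PySem.List.index?, PySem.List.count, PySem.List.pyRange_one_eq_nil]
  | cons x rest ih =>
      by_cases h1 : x = "#"
      · rw [show pvE (x :: rest) i b = pvE rest (i + 1) (i + 1) by rw [pvE]; simp [h1]]
        rw [h1, PySem.List.index?_cons_self "#" rest]
        simp [PySem.List.count, PySem.List.pyRange_one_eq_nil (le_refl b)]
      · rw [PySem.List.index?_cons_of_ne rest h1]
        by_cases h2 : x = "O"
        · rw [show pvE (x :: rest) i b = b :: pvE rest (i + 1) (b + 1) by rw [pvE]; simp [h2]]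
          rw [ih]
          cases hidx : PySem.List.index? rest "#" with
          | none =>
              simp only [Option.map_none]
              have hc : (PySem.List.count (x :: rest) "O" : Int)
                  = (PySem.List.count rest "O" : Int) + 1 := by
                simp [PySem.List.count, h2]
              rw [hc]
              conv_rhs => rw [PySem.List.pyRange_one_cons
                (show b < b + ((PySem.List.count rest "O" : Int) + 1) by omega)]
              have e : b + ((PySem.List.count rest "O" : Int) + 1)
                  = b + 1 + (PySem.List.count rest "O" : Int) := by ring
              rw [e]
          | some k =>
              simp only [Option.map_some]
              have hc : (PySem.List.count ((x :: rest).take (k + 1)) "O" : Int)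
                  = (PySem.List.count (rest.take k) "O" : Int) + 1 := by
                simp [PySem.List.count, h2]
              rw [show (x :: rest).drop (k + 1 + 1) = rest.drop (k + 1) from rfl, hc]
              conv_rhs => rw [PySem.List.pyRange_one_cons
                (show b < b + ((PySem.List.count (rest.take k) "O" : Int) + 1) by omega)]
              have e1 : b + ((PySem.List.count (rest.take k) "O" : Int) + 1)
                  = b + 1 + (PySem.List.count (rest.take k) "O" : Int) := by ring
              have e2 : i + ((k + 1 : Nat) : Int) + 1 = i + 1 + (k : Int) + 1 := by push_cast; ring
              rw [e1, e2, List.cons_append]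
        · rw [show pvE (x :: rest) i b = pvE rest (i + 1) b by rw [pvE]; simp [h2, h1]]
          rw [ih]
          cases hidx : PySem.List.index? rest "#" with
          | none =>
              simp only [Option.map_none]
              rw [show (PySem.List.count (x :: rest) "O") = (PySem.List.count rest "O") by
                simp [PySem.List.count, h2]]
          | some k =>
              simp only [Option.map_some]
              rw [show PySem.List.count ((x :: rest).take (k + 1)) "O"
                    = PySem.List.count (rest.take k) "O" by simp [PySem.List.count, h2],
                show (x :: rest).drop (k + 1 + 1) = rest.drop (k + 1) from rfl,
                show i + ((k + 1 : Nat) : Int) + 1 = i + 1 + (k : Int) + 1 by push_cast; ring]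

-- pvSettle with its slices rewritten to take/drop (its one-step unfolding).
theorem pvSettle_unfold (col : List String) (base : Int) :
    pvSettle col base =
      match PySem.List.index? col "#" with
      | none => PySem.List.pyRange base (base + (PySem.List.count col "O" : Int)) 1
      | some k =>
          PySem.List.pyRange base (base + (PySem.List.count (col.take k) "O" : Int)) 1
            ++ pvSettle (col.drop (k + 1)) (base + (k : Int) + 1) := by
  rw [pvSettle]
  cases hidx : PySem.List.index? col "#" with
  | none => simp
  | some k =>
      simp only
      rw [PySem.List.slice_to_natCast,
        show ((k : Int) + 1) = ((k + 1 : Nat) : Int) by push_cast; ring,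
        PySem.List.slice_from_natCast]

theorem pvE_eq_settle (n : Nat) (xs : List String) (hn : xs.length ≤ n) (i : Int) :
    pvE xs i i = pvSettle xs i := by
  induction n generalizing xs i with
  | zero =>
      have : xs = [] := List.eq_nil_of_length_eq_zero (Nat.le_zero.mp hn)
      subst this
      rw [pvE_seg, pvSettle_unfold]
      simp [PySem.List.index?]
  | succ n ih =>
      rw [pvE_seg, pvSettle_unfold]
      cases hidx : PySem.List.index? xs "#" with
      | none => simp
      | some k =>
          simp only
          have hmem : "#" ∈ xs := (PySem.List.index?_isSome_iff xs "#").mp (by rw [hidx]; rfl)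
          have hlen : 0 < xs.length := List.length_pos_of_mem hmem
          rw [ih (xs.drop (k + 1)) (by rw [List.length_drop]; omega)]

-- ===== VERDICT (by name: the statement is the Claim_ definition above) =====
theorem get_round_pos_spec : Claim_equal_get_round_pos := by
  intro col _
  unfold Spec_get_round_pos get_round_pos get_round_pos_alt
  rw [pvA_loop]
  simpa using pvE_eq_settle col.length col (le_refl _) 0
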